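-- pv_equiv track=rewrite | github.com/OndrejVana/TIAGO_Bachelor_Thesis | ros-ws/src/tiago/tiago_door_planning/src/tiago_door_planning/feasibility.py | _components_1d
-- ===== SOURCE A (Python) =====
-- def _components_1d(feasible):
--     """
--     Extract connected components of a 1D boolean feasibility mask.
--     """
--     comps = []
--     current_comp = []
--
--     for i, ok in enumerate(feasible):
--         if ok:
--             current_comp.append(i)
--         else:
--             if current_comp:
--                 comps.append(current_comp)
--                 current_comp = []
--
--     if current_comp:
--         comps.append(current_comp)
--
--     return comps
-- ===== SOURCE B (Python) =====
-- def _components_1d(feasible):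
--     """
--     Extract connected components of a 1D boolean feasibility mask.
--     """
--     n = len(feasible)
--     starts = [i for i in range(n) if feasible[i] and (i == 0 or not feasible[i - 1])]
--     ends = [i + 1 for i in range(n) if feasible[i] and (i == n - 1 or not feasible[i + 1])]
--     return [list(range(s, e)) for s, e in zip(starts, ends)]
-- ===== Notes on version B (the rewrite author's own statement) =====
-- stated objective: alternative
-- what changed: Instead of one stateful scan with a current-run buffer and a final flush, B works in staged passes: it first computes the list of run START boundaries and the list of run END boundaries by two independent comprehensions over indices (a start is a truthy cell whose left neighbour is falsy/absent, an end is a truthy cell whose right neighbour is falsy/absent), then zips the two boundary lists and materializes each run as list(range(start, end)).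
import Mathlib
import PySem

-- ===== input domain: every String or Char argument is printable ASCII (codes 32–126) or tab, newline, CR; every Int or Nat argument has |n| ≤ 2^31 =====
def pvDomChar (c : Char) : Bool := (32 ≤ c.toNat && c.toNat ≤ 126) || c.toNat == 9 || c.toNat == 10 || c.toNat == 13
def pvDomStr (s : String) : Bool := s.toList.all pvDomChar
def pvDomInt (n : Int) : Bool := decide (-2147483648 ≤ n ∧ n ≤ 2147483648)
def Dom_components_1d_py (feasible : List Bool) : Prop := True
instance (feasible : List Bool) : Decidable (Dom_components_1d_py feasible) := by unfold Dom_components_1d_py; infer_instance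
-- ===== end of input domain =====

-- B replaces A's single stateful scan (run buffer + final flush) by staged passes:
-- two independent boundary scans (run starts, run ends) zipped and expanded to ranges; same cost, alternative algorithm.

-- ===== PORT A =====
-- A: one pass over enumerate(feasible) with state (comps, current_comp), flushed at the end.
def components_1d_py (feasible : List Bool) : List (List Int) :=
  let st := (PySem.List.enumerate feasible).foldl
    (fun (s : List (List Int) × List Int) (p : Int × Bool) =>
      if p.2 then (s.1, s.2 ++ [p.1])
      else if s.2 ≠ [] then (s.1 ++ [s.2], []) else s)
    ([], [])
  if st.2 ≠ [] then st.1 ++ [st.2] else st.1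

-- ===== PORT B =====
-- B: starts = indices i with feasible[i] and (i = 0 or not feasible[i-1]);
--    ends   = i+1 for indices i with feasible[i] and (i = n-1 or not feasible[i+1]);
--    result = [list(range(s, e)) for s, e in zip(starts, ends)].
-- feasible[i] on the in-range indices produced by range(n) is List.getD; list(range(s,e)) is PySem.List.pyRange.
def components_1d_py_alt (feasible : List Bool) : List (List Int) :=
  let n := feasible.length
  let starts : List Nat := (List.range n).filter
    (fun i => feasible.getD i false && (decide (i = 0) || !(feasible.getD (i - 1) false)))
  let ends : List Nat := ((List.range n).filter
    (fun i => feasible.getD i false && (decide (i = n - 1) || !(feasible.getD (i + 1) false)))).map (· + 1)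
  (starts.zip ends).map (fun se => PySem.List.pyRange (se.1 : Int) (se.2 : Int) 1)

-- ===== PRECONDITION & SPEC =====
def Spec_components_1d_py (feasible : List Bool) (out : List (List Int)) : Prop := out = components_1d_py_alt feasible
instance (feasible : List Bool) (out : List (List Int)) : Decidable (Spec_components_1d_py feasible out) := by unfold Spec_components_1d_py; infer_instance

-- ===== CLAIM (what is proved, stated in full; the proofs are below) =====
def Claim_equal_components_1d_py : Prop := ∀ (feasible : List Bool), Dom_components_1d_py feasible → Spec_components_1d_py feasible (components_1d_py feasible)

-- ===== LEMMAS AND PROOFS =====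

-- Canonical recursive run-splitter: the common reference both ports are reduced to.
def altGo (l : List Bool) (i : Int) : List (List Int) :=
  match l with
  | [] => []
  | false :: rest => altGo rest (i + 1)
  | true :: rest =>
    let run := rest.takeWhile id
    let rest' := rest.dropWhile id
    ((List.range (run.length + 1)).map (fun (k : Nat) => i + (k : Int))) :: altGo rest' (i + 1 + run.length)
termination_by l.length
decreasing_by
· simp
· have := List.length_dropWhile_le (p := id) (l := rest); simp; omega

-- ---------- A-side: the fold with (comps, current) state equals altGo ----------

def aStep (s : List (List Int) × List Int) (p : Int × Bool) : List (List Int) × List Int :=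
  if p.2 then (s.1, s.2 ++ [p.1])
  else if s.2 ≠ [] then (s.1 ++ [s.2], []) else s

def aFinish (s : List (List Int) × List Int) : List (List Int) :=
  if s.2 ≠ [] then s.1 ++ [s.2] else s.1

theorem components_1d_py_eq_finish (feasible : List Bool) :
    components_1d_py feasible =
      aFinish ((PySem.List.enumerate feasible).foldl aStep ([], [])) := rfl

def glue (cur : List Int) (l : List Bool) (gs : List (List Int)) : List (List Int) :=
  if cur = [] then gs
  else if l.headD false then (cur ++ gs.headD []) :: gs.tail
  else cur :: gs

theorem altGo_nil (i : Int) : altGo [] i = [] := by rw [altGo]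

theorem altGo_false (rest : List Bool) (i : Int) :
    altGo (false :: rest) i = altGo rest (i + 1) := by rw [altGo]

theorem range_map_shift (n : Nat) (i : Int) :
    (List.range (n + 1)).map (fun (k : Nat) => i + (k : Int)) =
      i :: (List.range n).map (fun (k : Nat) => (i + 1) + (k : Int)) := by
  rw [List.range_succ_eq_map, List.map_cons, List.map_map]
  congr 1
  · norm_num
  · apply List.map_congr_left
    intro k _
    simp only [Function.comp_apply]
    push_cast
    ring

theorem altGo_true (rest : List Bool) (i : Int) :
    altGo (true :: rest) i =
      (if rest.headD false then (i :: (altGo rest (i + 1)).headD []) :: (altGo rest (i + 1)).tail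
       else [i] :: altGo rest (i + 1)) := by
  match rest with
  | [] => simp [altGo]
  | false :: r2 => simp [altGo]
  | true :: r2 =>
    conv_lhs => rw [altGo]
    simp only [altGo, List.takeWhile_cons, List.dropWhile_cons, id_eq, if_pos, List.headD,
      List.head?_cons, Option.getD_some, if_true, List.length_cons]
    rw [show (r2.takeWhile id).length + 1 + 1 = ((r2.takeWhile id).length + 1) + 1 from rfl,
      range_map_shift]
    simp only [List.headD, List.head?_cons, Option.getD_some, List.tail_cons]
    congr 2
    omega

theorem main_invariant (l : List Bool) (i : Int) (comps : List (List Int)) (cur : List Int) :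
    aFinish ((PySem.List.enumerate l i).foldl aStep (comps, cur)) =
      comps ++ glue cur l (altGo l i) := by
  induction l generalizing i comps cur with
  | nil =>
    by_cases h : cur = [] <;>
      simp [PySem.List.enumerate, aFinish, glue, h, altGo_nil]
  | cons b rest ih =>
    rw [PySem.List.enumerate_cons]
    simp only [List.foldl_cons]
    cases b with
    | false =>
      by_cases h : cur = []
      · subst h
        rw [show aStep (comps, []) (i, false) = (comps, []) from by simp [aStep]]
        rw [ih]
        simp [glue, altGo_false]
      · rw [show aStep (comps, cur) (i, false) = (comps ++ [cur], []) from by simp [aStep, h]]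
        rw [ih]
        simp [glue, altGo_false, h, List.headD]
    | true =>
      rw [show aStep (comps, cur) (i, true) = (comps, cur ++ [i]) from by simp [aStep]]
      rw [ih, altGo_true]
      by_cases hr : rest.headD false = true
      · by_cases h : cur = [] <;> simp_all [glue, List.headD]
      · by_cases h : cur = [] <;> simp_all [glue, List.headD]

theorem a_eq_altGo (l : List Bool) : components_1d_py l = altGo l 0 := by
  rw [components_1d_py_eq_finish]
  simpa [glue] using main_invariant l 0 [] []

-- ---------- B-side: the boundary filters, recursively ----------

-- Run-start indices of l when the (virtual) element just left of l is prev.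
def Sg : Bool → List Bool → List Nat
  | _, [] => []
  | prev, b :: r => (if b && !prev then [0] else []) ++ (Sg b r).map (· + 1)

-- Run-end indices (index of the LAST cell of each run; the port's ends list is this mapped by +1).
def EgIdx : List Bool → List Nat
  | [] => []
  | b :: r => (if b && !(r.headD false) then [0] else []) ++ (EgIdx r).map (· + 1)

theorem starts_filter_eq_Sg (l : List Bool) (prev : Bool) :
    (List.range l.length).filter
      (fun i => l.getD i false && !(if i = 0 then prev else l.getD (i - 1) false)) = Sg prev l := by
  induction l generalizing prev with
  | nil => simp [Sg]
  | cons b r ih =>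
    rw [List.length_cons, List.range_succ_eq_map, List.filter_cons, List.filter_map]
    have hpred : ∀ i : Nat,
        ((fun i => (b :: r).getD i false && !(if i = 0 then prev else (b :: r).getD (i - 1) false)) ∘ Nat.succ) i
          = (fun i => r.getD i false && !(if i = 0 then b else r.getD (i - 1) false)) i := by
      intro i
      cases i <;> simp [List.getD]
    rw [show ((fun i => (b :: r).getD i false && !(if i = 0 then prev else (b :: r).getD (i - 1) false)) ∘ Nat.succ)
          = (fun i => r.getD i false && !(if i = 0 then b else r.getD (i - 1) false)) from funext hpred, ih b]
    by_cases hb : (b && !prev) = true <;>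
      simp [Sg, hb, List.getD, Nat.succ_eq_add_one] at * <;> simp_all

theorem ends_filter_eq_EgIdx (l : List Bool) :
    (List.range l.length).filter
      (fun i => l.getD i false && (decide (i = l.length - 1) || !(l.getD (i + 1) false))) = EgIdx l := by
  induction l with
  | nil => simp [EgIdx]
  | cons b r ih =>
    rw [List.length_cons, List.range_succ_eq_map, List.filter_cons, List.filter_map]
    have hpred : (List.range r.length).filter
        ((fun i => (b :: r).getD i false && (decide (i = r.length + 1 - 1) || !((b :: r).getD (i + 1) false))) ∘ Nat.succ)
        = (List.range r.length).filter
          (fun i => r.getD i false && (decide (i = r.length - 1) || !(r.getD (i + 1) false))) := by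
      apply List.filter_congr
      intro i hi
      rw [List.mem_range] at hi
      have hd : decide (i + 1 = r.length + 1 - 1) = decide (i = r.length - 1) := by
        rw [decide_eq_decide]; omega
      simp only [Function.comp_apply, Nat.succ_eq_add_one, List.getD_cons_succ, hd]
    rw [hpred, ih]
    cases r with
    | nil => by_cases hb : b = true <;> simp [EgIdx, hb, List.getD, List.headD]
    | cons c r2 =>
      by_cases hb : (b && !c) = true <;>
        simp [EgIdx, List.getD, List.headD, Nat.succ_eq_add_one, hb] at * <;> simp_all

theorem Sg_true (r : List Bool) :
    Sg true r = (Sg false (r.dropWhile id)).map (· + (r.takeWhile id).length) := by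
  induction r with
  | nil => simp [Sg]
  | cons b r2 ih =>
    cases b with
    | false => simp [Sg, List.takeWhile_cons, List.dropWhile_cons]
    | true =>
      have h1 : Sg true (true :: r2) = (Sg true r2).map (· + 1) := by simp [Sg]
      rw [h1, ih, List.map_map]
      simp only [List.takeWhile_cons, List.dropWhile_cons, id_eq, if_pos, List.length_cons]
      apply List.map_congr_left
      intro x _
      simp only [Function.comp_apply]
      omega

theorem EgIdx_true (r : List Bool) :
    EgIdx (true :: r) =
      (r.takeWhile id).length :: (EgIdx (r.dropWhile id)).map (· + ((r.takeWhile id).length + 1)) := by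
  induction r with
  | nil => simp [EgIdx]
  | cons b r2 ih =>
    cases b with
    | false => simp [EgIdx, List.takeWhile_cons, List.dropWhile_cons, List.headD]
    | true =>
      have h1 : EgIdx (true :: true :: r2) = (EgIdx (true :: r2)).map (· + 1) := by
        simp [EgIdx, List.headD]
      rw [h1, ih, List.map_cons, List.map_map]
      simp only [List.takeWhile_cons, List.dropWhile_cons, id_eq, if_pos, List.length_cons]
      refine congrArg _ ?_
      apply List.map_congr_left
      intro x _
      simp only [Function.comp_apply]
      omega

-- pyRange shifts.
theorem pyRange_one_shift (a b c : Int) :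
    PySem.List.pyRange (a + c) (b + c) 1 = (PySem.List.pyRange a b 1).map (· + c) := by
  rw [PySem.List.pyRange_one, PySem.List.pyRange_one,
    show b + c - (a + c) = b - a from by ring, List.map_map]
  apply List.map_congr_left
  intro k _
  simp only [Function.comp_apply]
  ring

-- Zip two boundary lists and expand every (start, one-past-end) pair to its range.
def runsOf (s e : List Nat) : List (List Int) :=
  (s.zip e).map (fun se => PySem.List.pyRange (se.1 : Int) (se.2 : Int) 1)

-- zipRuns: B's zip-and-expand, phrased on the recursive boundary lists.
def zipRuns (l : List Bool) : List (List Int) :=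
  runsOf (Sg false l) ((EgIdx l).map (· + 1))

theorem b_eq_zipRuns (l : List Bool) : components_1d_py_alt l = zipRuns l := by
  unfold components_1d_py_alt zipRuns runsOf
  have hs : (List.range l.length).filter
      (fun i => l.getD i false && (decide (i = 0) || !(l.getD (i - 1) false))) = Sg false l := by
    rw [← starts_filter_eq_Sg l false]
    apply List.filter_congr
    intro i _
    by_cases h : i = 0 <;> simp [h]
  simp only [hs, ends_filter_eq_EgIdx]

-- Shifting both boundary lists by c shifts every produced run by c.
theorem runsOf_shift (s : List Nat) (f : List Nat) (c : Nat) :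
    runsOf (s.map (· + c)) (f.map (· + c)) = (runsOf s f).map (List.map (· + (c : Int))) := by
  induction s generalizing f with
  | nil => simp [runsOf]
  | cons a s ih =>
    cases f with
    | nil => simp [runsOf]
    | cons b f =>
      simp only [List.map_cons, runsOf, List.zip_cons_cons, List.map_cons] at *
      congr 1
      · rw [show ((a + c : Nat) : Int) = (a : Int) + (c : Int) from by push_cast; ring,
          show ((b + c : Nat) : Int) = (b : Int) + (c : Int) from by push_cast; ring,
          pyRange_one_shift]
      · exact ih f

theorem map_add_comm (l : List Nat) (c d : Nat) :
    (l.map (· + c)).map (· + d) = (l.map (· + d)).map (· + c) := by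
  rw [List.map_map, List.map_map]
  apply List.map_congr_left
  intro x _
  simp only [Function.comp_apply]
  omega

theorem zipRuns_altGo (l : List Bool) (i : Int) :
    altGo l i = (zipRuns l).map (List.map (· + i)) := by
  induction l, i using altGo.induct with
  | case1 i => simp [altGo_nil, zipRuns, runsOf, Sg, EgIdx]
  | case2 i rest ih =>
    rw [altGo_false, ih]
    unfold zipRuns
    rw [show Sg false (false :: rest) = (Sg false rest).map (· + 1) from by simp [Sg],
      show EgIdx (false :: rest) = (EgIdx rest).map (· + 1) from by simp [EgIdx],
      map_add_comm (EgIdx rest) 1 1, runsOf_shift, List.map_map]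
    apply List.map_congr_left
    intro xs _
    simp only [Function.comp_apply, List.map_map]
    apply List.map_congr_left
    intro x _
    simp only [Function.comp_apply]
    push_cast
    ring
  | case3 i rest run rest' ih =>
    rw [altGo]
    rw [ih]
    unfold zipRuns
    rw [show Sg false (true :: rest) = 0 :: (Sg true rest).map (· + 1) from by simp [Sg],
      Sg_true, EgIdx_true, List.map_map]
    have hS : (Sg false (rest.dropWhile id)).map ((fun x => x + 1) ∘ fun x => x + (rest.takeWhile id).length)
        = (Sg false (rest.dropWhile id)).map (· + ((rest.takeWhile id).length + 1)) :=
      List.map_congr_left (fun x _ => by simp only [Function.comp_apply]; omega)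
    rw [hS, List.map_cons, map_add_comm (EgIdx (rest.dropWhile id)) ((rest.takeWhile id).length + 1) 1]
    unfold runsOf
    rw [List.zip_cons_cons, List.map_cons, List.map_cons]
    have htail : (((Sg false (rest.dropWhile id)).map (· + ((rest.takeWhile id).length + 1))).zip
          (((EgIdx (rest.dropWhile id)).map (· + 1)).map (· + ((rest.takeWhile id).length + 1)))).map
            (fun se => PySem.List.pyRange (se.1 : Int) (se.2 : Int) 1)
        = (runsOf (Sg false (rest.dropWhile id)) ((EgIdx (rest.dropWhile id)).map (· + 1))).map
            (List.map (· + (((rest.takeWhile id).length + 1 : Nat) : Int))) := by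
      exact runsOf_shift _ _ _
    rw [htail]
    congr 1
    · -- head run
      rw [show ((0 : Nat) : Int) = (0 : Int) from rfl, PySem.List.pyRange_one]
      rw [show (((rest.takeWhile id).length + 1 : Nat) : Int) - 0
            = (((rest.takeWhile id).length + 1 : Nat) : Int) from by ring, Int.toNat_natCast]
      rw [List.map_map]
      apply List.map_congr_left
      intro k _
      simp only [Function.comp_apply]
      push_cast
      ring
    · -- remaining runs
      unfold runsOf
      simp only [List.map_map]
      apply List.map_congr_left
      intro se _
      simp only [Function.comp_apply, List.map_map]
      apply List.map_congr_left
      intro x _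
      simp only [Function.comp_apply]
      push_cast
      ring

-- ===== VERDICT (by name: the statement is the Claim_ definition above) =====
theorem components_1d_py_spec : Claim_equal_components_1d_py := by
  intro feasible _
  unfold Spec_components_1d_py
  rw [a_eq_altGo, b_eq_zipRuns, zipRuns_altGo feasible 0]
  have h0 : (zipRuns feasible).map (List.map (· + (0 : Int)))
      = (zipRuns feasible).map id := List.map_congr_left (fun xs _ => by simp)
  rw [h0, List.map_id]
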